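-- pv_equiv track=rewrite | github.com/mims-harvard/ATOMICA | scripts/data_process/get_esm2_embeddings.py | get_chunk_idxs
-- ===== SOURCE A (Python) =====
-- from typing import Tuple, List, Optional, Dict
--
-- def get_chunk_idxs(
--     seq_len: int,
--     max_len: int,
-- ) -> List[int]:
--     num_pieces = (seq_len + max_len - 1) // max_len
--     lo_size = seq_len // num_pieces
--     hi_size = lo_size + 1
--     num_hi = seq_len % num_pieces
--
--     chunk_lens = [hi_size for _ in range(num_hi)] + [lo_size for _ in range(num_pieces - num_hi)]
--
--     chunk_idxs = []
--     curr = 0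
--     for chunk_len in chunk_lens:
--         chunk_idxs.append((curr, curr+chunk_len))
--         curr += chunk_len
--     return chunk_idxs
-- ===== SOURCE B (Python) =====
-- def get_chunk_idxs(
--     seq_len: int,
--     max_len: int,
-- ):
--     num_pieces = (seq_len + max_len - 1) // max_len
--     lo_size = seq_len // num_pieces
--     num_hi = seq_len % num_pieces
--
--     def boundary(i):
--         return i * lo_size + min(i, num_hi)
--
--     return [(boundary(i), boundary(i + 1)) for i in range(num_pieces)]
-- ===== Notes on version B (the rewrite author's own statement) =====
-- stated objective: simpler
-- what changed: Replaces the explicit chunk-length list and running-sum accumulator with a closed-form boundary formula b(i) = i*lo_size + min(i, num_hi), emitting each (start,end) pair directly.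
import Mathlib
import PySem

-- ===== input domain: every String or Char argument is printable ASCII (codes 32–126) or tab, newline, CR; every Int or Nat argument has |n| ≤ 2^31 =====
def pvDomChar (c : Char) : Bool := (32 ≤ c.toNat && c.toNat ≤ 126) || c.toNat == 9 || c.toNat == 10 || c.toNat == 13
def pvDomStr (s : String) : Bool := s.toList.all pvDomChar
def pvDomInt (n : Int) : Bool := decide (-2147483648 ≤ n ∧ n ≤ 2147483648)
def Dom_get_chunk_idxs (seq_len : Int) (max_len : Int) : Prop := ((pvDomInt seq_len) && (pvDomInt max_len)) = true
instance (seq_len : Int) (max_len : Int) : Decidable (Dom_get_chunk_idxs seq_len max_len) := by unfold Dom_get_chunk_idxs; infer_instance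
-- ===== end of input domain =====

-- B replaces A's chunk-length list + running-sum accumulator with a closed-form
-- boundary formula b(i) = i*lo_size + min(i, num_hi); same cost, simpler.


-- ===== PORT A =====
def get_chunk_idxs (seq_len : Int) (max_len : Int) : List (Int × Int) :=
  let num_pieces := PySem.Int.floordiv (seq_len + max_len - 1) max_len
  let lo_size := PySem.Int.floordiv seq_len num_pieces
  let hi_size := lo_size + 1
  let num_hi := PySem.Int.mod seq_len num_pieces
  let chunk_lens :=
    (PySem.List.pyRange 0 num_hi 1).map (fun _ => hi_size)
      ++ (PySem.List.pyRange 0 (num_pieces - num_hi) 1).map (fun _ => lo_size)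
  (chunk_lens.foldl
    (fun (acc : List (Int × Int) × Int) chunk_len =>
      (acc.1 ++ [(acc.2, acc.2 + chunk_len)], acc.2 + chunk_len))
    ([], 0)).1

-- ===== PORT B =====
def get_chunk_idxs_alt (seq_len : Int) (max_len : Int) : List (Int × Int) :=
  let num_pieces := PySem.Int.floordiv (seq_len + max_len - 1) max_len
  let lo_size := PySem.Int.floordiv seq_len num_pieces
  let num_hi := PySem.Int.mod seq_len num_pieces
  let boundary := fun (i : Int) => i * lo_size + min i num_hi
  (PySem.List.pyRange 0 num_pieces 1).map (fun i => (boundary i, boundary (i + 1)))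

-- ===== PRECONDITION & SPEC =====
-- Pre_ excludes exactly the inputs where the Python A raises ZeroDivisionError
-- (max_len == 0, or num_pieces == 0); B raises identically there.
def Pre_get_chunk_idxs (seq_len : Int) (max_len : Int) : Prop :=
  max_len ≠ 0 ∧ PySem.Int.floordiv (seq_len + max_len - 1) max_len ≠ 0
instance (seq_len : Int) (max_len : Int) : Decidable (Pre_get_chunk_idxs seq_len max_len) := by unfold Pre_get_chunk_idxs; infer_instance

def pvWitness_get_chunk_idxs : Int × Int := (10, 3)

def Spec_get_chunk_idxs (seq_len : Int) (max_len : Int) (out : List (Int × Int)) : Prop := out = get_chunk_idxs_alt seq_len max_len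
instance (seq_len : Int) (max_len : Int) (out : List (Int × Int)) : Decidable (Spec_get_chunk_idxs seq_len max_len out) := by unfold Spec_get_chunk_idxs; infer_instance

-- ===== CLAIM (what is proved, stated in full; the proofs are below) =====
def Claim_equal_get_chunk_idxs : Prop := ∀ (seq_len : Int) (max_len : Int), Dom_get_chunk_idxs seq_len max_len → Pre_get_chunk_idxs seq_len max_len → Spec_get_chunk_idxs seq_len max_len (get_chunk_idxs seq_len max_len)

-- ===== LEMMAS AND PROOFS =====

/-- The (start, end) pairs produced by A's running-sum loop. -/
def pvPairs : List Int → Int → List (Int × Int)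
  | [], _ => []
  | x :: xs, curr => (curr, curr + x) :: pvPairs xs (curr + x)

theorem pvFoldl_eq_pvPairs (lens : List Int) (acc : List (Int × Int)) (curr : Int) :
    lens.foldl
      (fun (acc : List (Int × Int) × Int) chunk_len =>
        (acc.1 ++ [(acc.2, acc.2 + chunk_len)], acc.2 + chunk_len))
      (acc, curr)
    = (acc ++ pvPairs lens curr, curr + lens.sum) := by
  induction lens generalizing acc curr with
  | nil => simp [pvPairs]
  | cons x xs ih => simp [pvPairs, ih, add_assoc]

theorem pvPairs_append (xs ys : List Int) (curr : Int) :
    pvPairs (xs ++ ys) curr = pvPairs xs curr ++ pvPairs ys (curr + xs.sum) := by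
  induction xs generalizing curr with
  | nil => simp [pvPairs]
  | cons x xs ih => simp [pvPairs, ih, add_assoc]

theorem pvPairs_replicate (n : Nat) (c curr : Int) :
    pvPairs (List.replicate n c) curr
      = (List.range n).map
          (fun k : Nat => (curr + (k : Int) * c, curr + ((k : Int) + 1) * c)) := by
  induction n generalizing curr with
  | zero => simp [pvPairs]
  | succ n ih =>
    rw [List.replicate_succ, List.range_succ_eq_map]
    simp only [pvPairs, ih, List.map_cons, List.map_map, Function.comp_def]
    congr 1
    · norm_num
    · apply List.map_congr_left
      intro k _
      simp only [Prod.mk.injEq]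
      constructor <;> (push_cast; ring)

theorem pvKey (np lo nh : Int) (hnh0 : 0 ≤ nh) (hnhlt : nh < np) :
    ((((PySem.List.pyRange 0 nh 1).map (fun _ => lo + 1)
        ++ (PySem.List.pyRange 0 (np - nh) 1).map (fun _ => lo)).foldl
      (fun (acc : List (Int × Int) × Int) chunk_len =>
        (acc.1 ++ [(acc.2, acc.2 + chunk_len)], acc.2 + chunk_len))
      ([], 0)).1 : List (Int × Int))
    = (PySem.List.pyRange 0 np 1).map
        (fun i => (i * lo + min i nh, (i + 1) * lo + min (i + 1) nh)) := by
  rw [pvFoldl_eq_pvPairs]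
  simp only [List.nil_append, List.map_const', PySem.List.length_pyRange_one, sub_zero]
  rw [pvPairs_append, pvPairs_replicate, pvPairs_replicate]
  have hsum : (List.replicate nh.toNat (lo + 1)).sum = (nh.toNat : Int) * (lo + 1) := by
    simp [List.sum_replicate]
  rw [hsum, Int.toNat_of_nonneg hnh0]
  rw [PySem.List.pyRange_one_append 0 nh np hnh0 hnhlt.le, List.map_append,
      PySem.List.pyRange_one, PySem.List.pyRange_one]
  simp only [List.map_map, Function.comp_def, zero_add, sub_zero]
  congr 1
  · apply List.map_congr_left
    intro k hk
    rw [List.mem_range] at hk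
    have hk' : (k : Int) < nh := by omega
    rw [min_eq_left (by omega : (k : Int) ≤ nh),
        min_eq_left (by omega : (k : Int) + 1 ≤ nh)]
    simp only [Prod.mk.injEq]
    constructor <;> ring
  · apply List.map_congr_left
    intro k hk
    rw [min_eq_right (by omega : nh ≤ nh + (k : Int)),
        min_eq_right (by omega : nh ≤ nh + (k : Int) + 1)]
    simp only [Prod.mk.injEq]
    constructor <;> ring

theorem get_chunk_idxs_spec : Claim_equal_get_chunk_idxs := by
  intro seq_len max_len _ hpre
  obtain ⟨hm, hnp⟩ := hpre
  unfold Spec_get_chunk_idxs get_chunk_idxs get_chunk_idxs_alt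
  simp only []
  rcases lt_or_gt_of_ne hnp with hneg | hpos
  · -- num_pieces < 0: every range is empty, both sides are []
    have h1 := PySem.Int.mod_neg_bounds seq_len hneg
    rw [PySem.List.pyRange_one_eq_nil h1.2,
        PySem.List.pyRange_one_eq_nil (by omega :
          PySem.Int.floordiv (seq_len + max_len - 1) max_len
            - PySem.Int.mod seq_len (PySem.Int.floordiv (seq_len + max_len - 1) max_len) ≤ 0),
        PySem.List.pyRange_one_eq_nil (le_of_lt hneg)]
    simp
  · exact pvKey _ _ _ (PySem.Int.mod_nonneg seq_len hpos)
      (PySem.Int.mod_lt seq_len hpos)
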